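-- pv_equiv track=rewrite | github.com/benquick123/code-profiling | code/batch-2/vse-naloge-brez-testov/DN7-M-033.py | brez_sosedov
-- ===== SOURCE A (Python) =====
-- def sosedov(x, y, mine):
--     vrni = 0 #stevilo sosedov
--     for koordinate in mine:
--         if koordinate == (x, y+1):
--             vrni += 1
--         elif koordinate == (x, y-1):
--             vrni += 1
--         elif koordinate == (x+1, y):
--             vrni += 1
--         elif koordinate == (x+1, y+1):
--             vrni += 1
--         elif koordinate == (x+1, y-1):
--             vrni += 1
--         elif koordinate == (x-1, y-1):
--             vrni += 1
--         elif koordinate == (x-1, y):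
--             vrni += 1
--         elif koordinate == (x-1, y+1):
--             vrni += 1
--     return vrni
--
-- def brez_sosedov(mine, s, v):
--     vrni = set()
--     for x1 in range(0, int(s)):
--         for y1 in range(0, v):
--             st_sosedov = sosedov(x1, y1, mine)
--             if st_sosedov == 0:
--                 koordinate = x1, y1
--                 vrni.add(koordinate)
--     return vrni
-- ===== SOURCE B (Python) =====
-- def brez_sosedov(mine, s, v):
--     ogrozene = set()
--     for mx, my in mine:
--         for dx, dy in ((0, 1), (0, -1), (1, 0), (1, 1), (1, -1), (-1, -1), (-1, 0), (-1, 1)):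
--             ogrozene.add((mx + dx, my + dy))
--     vrni = set()
--     for x1 in range(int(s)):
--         for y1 in range(v):
--             if (x1, y1) not in ogrozene:
--                 vrni.add((x1, y1))
--     return vrni
-- ===== Notes on version B (the rewrite author's own statement) =====
-- stated objective: faster
-- what changed: Instead of counting, for every grid cell, how many mines lie in its 8 neighbor positions by scanning the whole mine list per cell, B precomputes once the set of all cells adjacent to any mine and then sweeps the grid keeping cells not in that set.
import Mathlib
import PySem

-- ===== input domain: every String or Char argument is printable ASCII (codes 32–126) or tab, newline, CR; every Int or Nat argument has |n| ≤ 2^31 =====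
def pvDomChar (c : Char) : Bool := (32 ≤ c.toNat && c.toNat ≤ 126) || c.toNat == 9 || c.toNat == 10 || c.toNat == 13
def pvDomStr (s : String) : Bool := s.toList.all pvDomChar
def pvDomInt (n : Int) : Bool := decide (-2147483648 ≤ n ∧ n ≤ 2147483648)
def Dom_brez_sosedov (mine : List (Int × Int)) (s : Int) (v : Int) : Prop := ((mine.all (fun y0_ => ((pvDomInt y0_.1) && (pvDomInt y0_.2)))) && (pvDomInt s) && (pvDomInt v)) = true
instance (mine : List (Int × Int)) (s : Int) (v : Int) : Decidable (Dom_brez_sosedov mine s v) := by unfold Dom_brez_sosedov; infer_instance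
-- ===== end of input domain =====

-- B replaces A's per-cell scan of the whole mine list by one precomputed set of
-- mine-adjacent cells, then a plain grid sweep (objective: faster).

-- ===== PORT A =====
def sosedov (x y : Int) (mine : List (Int × Int)) : Int :=
  mine.foldl (fun vrni koordinate =>
    if koordinate = (x, y + 1) then vrni + 1
    else if koordinate = (x, y - 1) then vrni + 1
    else if koordinate = (x + 1, y) then vrni + 1
    else if koordinate = (x + 1, y + 1) then vrni + 1
    else if koordinate = (x + 1, y - 1) then vrni + 1
    else if koordinate = (x - 1, y - 1) then vrni + 1
    else if koordinate = (x - 1, y) then vrni + 1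
    else if koordinate = (x - 1, y + 1) then vrni + 1
    else vrni) 0

def brez_sosedov (mine : List (Int × Int)) (s : Int) (v : Int) : List (Int × Int) :=
  (PySem.List.pyRange 0 s 1).foldl (fun vrni x1 =>
    (PySem.List.pyRange 0 v 1).foldl (fun vrni y1 =>
      if sosedov x1 y1 mine = 0 then PySem.Set.add vrni (x1, y1) else vrni) vrni)
    PySem.Set.empty

-- ===== PORT B =====
def pvDeltas : List (Int × Int) :=
  [(0, 1), (0, -1), (1, 0), (1, 1), (1, -1), (-1, -1), (-1, 0), (-1, 1)]

def pvOgrozene (mine : List (Int × Int)) : PySem.Set (Int × Int) :=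
  mine.foldl (fun og m =>
    pvDeltas.foldl (fun og d => PySem.Set.add og (m.1 + d.1, m.2 + d.2)) og)
    PySem.Set.empty

def brez_sosedov_alt (mine : List (Int × Int)) (s : Int) (v : Int) : List (Int × Int) :=
  let ogrozene := pvOgrozene mine
  (PySem.List.pyRange 0 s 1).foldl (fun vrni x1 =>
    (PySem.List.pyRange 0 v 1).foldl (fun vrni y1 =>
      if PySem.Set.contains ogrozene (x1, y1) = false then PySem.Set.add vrni (x1, y1) else vrni) vrni)
    PySem.Set.empty

-- ===== PRECONDITION & SPEC =====
def Spec_brez_sosedov (mine : List (Int × Int)) (s : Int) (v : Int) (out : List (Int × Int)) : Prop := out = brez_sosedov_alt mine s v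
instance (mine : List (Int × Int)) (s : Int) (v : Int) (out : List (Int × Int)) : Decidable (Spec_brez_sosedov mine s v out) := by unfold Spec_brez_sosedov; infer_instance

-- ===== CLAIM (what is proved, stated in full; the proofs are below) =====
def Claim_equal_brez_sosedov : Prop := ∀ (mine : List (Int × Int)) (s : Int) (v : Int), Dom_brez_sosedov mine s v → Spec_brez_sosedov mine s v (brez_sosedov mine s v)

-- ===== LEMMAS AND PROOFS =====

-- A's per-mine test, as a single Boolean disjunction
def condAb (x y : Int) (m : Int × Int) : Bool :=
  m == (x, y + 1) || m == (x, y - 1) || m == (x + 1, y) || m == (x + 1, y + 1) ||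
  m == (x + 1, y - 1) || m == (x - 1, y - 1) || m == (x - 1, y) || m == (x - 1, y + 1)

theorem sosedov_step_eq (x y vrni : Int) (m : Int × Int) :
    (if m = (x, y + 1) then vrni + 1
     else if m = (x, y - 1) then vrni + 1
     else if m = (x + 1, y) then vrni + 1
     else if m = (x + 1, y + 1) then vrni + 1
     else if m = (x + 1, y - 1) then vrni + 1
     else if m = (x - 1, y - 1) then vrni + 1
     else if m = (x - 1, y) then vrni + 1
     else if m = (x - 1, y + 1) then vrni + 1
     else vrni) = if condAb x y m = true then vrni + 1 else vrni := by
  simp only [condAb, Bool.or_eq_true, beq_iff_eq]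
  split_ifs <;> tauto

theorem sosedov_foldl_ge (x y : Int) (mine : List (Int × Int)) : ∀ c : Int,
    c ≤ mine.foldl (fun vrni m => if condAb x y m = true then vrni + 1 else vrni) c := by
  induction mine with
  | nil => intro c; simp
  | cons m t ih =>
    intro c
    have h := ih (if condAb x y m = true then c + 1 else c)
    simp only [List.foldl_cons]
    split_ifs at h ⊢ <;> omega

theorem sosedov_eq_zero_iff (x y : Int) (mine : List (Int × Int)) :
    sosedov x y mine = 0 ↔ ∀ m ∈ mine, ¬ condAb x y m = true := by
  have key : ∀ (t : List (Int × Int)) (c : Int),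
      t.foldl (fun vrni m => if condAb x y m = true then vrni + 1 else vrni) c = c ↔
        ∀ m ∈ t, ¬ condAb x y m = true := by
    intro t
    induction t with
    | nil => intro c; simp
    | cons m t ih =>
      intro c
      simp only [List.foldl_cons, List.mem_cons]
      by_cases h : condAb x y m = true
      · rw [if_pos h]
        have hge := sosedov_foldl_ge x y t (c + 1)
        constructor
        · intro he; exfalso; omega
        · intro hall; exact absurd h (hall m (Or.inl rfl))
      · rw [if_neg h, ih c]
        constructor
        · intro hall m' hm'; rcases hm' with rfl | hm'
          · exact h
          · exact hall m' hm'
        · intro hall m' hm'; exact hall m' (Or.inr hm')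
  have hrw : sosedov x y mine =
      mine.foldl (fun vrni m => if condAb x y m = true then vrni + 1 else vrni) 0 := by
    unfold sosedov
    congr 1
    funext vrni m
    exact sosedov_step_eq x y vrni m
  rw [hrw, key mine 0]

theorem condA_iff_delta (x y : Int) (m : Int × Int) :
    condAb x y m = true ↔ ∃ d ∈ pvDeltas, (x, y) = (m.1 + d.1, m.2 + d.2) := by
  obtain ⟨m1, m2⟩ := m
  simp only [condAb, Bool.or_eq_true, beq_iff_eq, pvDeltas, List.mem_cons,
    List.not_mem_nil, or_false, exists_eq_or_imp, exists_eq_left, Prod.mk.injEq]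
  omega

theorem mem_ogrozene (mine : List (Int × Int)) (p : Int × Int) :
    p ∈ pvOgrozene mine ↔ ∃ m ∈ mine, ∃ d ∈ pvDeltas, p = (m.1 + d.1, m.2 + d.2) := by
  have key : ∀ (t : List (Int × Int)) (og : PySem.Set (Int × Int)),
      p ∈ t.foldl (fun og m =>
          pvDeltas.foldl (fun og d => PySem.Set.add og (m.1 + d.1, m.2 + d.2)) og) og ↔
        p ∈ og ∨ ∃ m ∈ t, ∃ d ∈ pvDeltas, p = (m.1 + d.1, m.2 + d.2) := by
    intro t
    induction t with
    | nil => intro og; simp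
    | cons m t ih =>
      intro og
      simp only [List.foldl_cons, ih, List.mem_cons]
      rw [PySem.Set.mem_foldl_add]
      constructor
      · rintro (⟨h | h⟩ | h)
        · exact Or.inl h
        · exact Or.inr ⟨m, Or.inl rfl, h⟩
        · obtain ⟨m', hm', hd⟩ := h; exact Or.inr ⟨m', Or.inr hm', hd⟩
      · rintro (h | ⟨m', rfl | hm', hd⟩)
        · exact Or.inl (Or.inl h)
        · exact Or.inl (Or.inr hd)
        · exact Or.inr ⟨m', hm', hd⟩
  unfold pvOgrozene
  rw [key mine PySem.Set.empty]
  simp [PySem.Set.empty]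

theorem cond_key (mine : List (Int × Int)) (x y : Int) :
    (sosedov x y mine = 0) ↔ (PySem.Set.contains (pvOgrozene mine) (x, y) = false) := by
  rw [sosedov_eq_zero_iff]
  rw [show (PySem.Set.contains (pvOgrozene mine) (x, y) = false) ↔
        ¬ (x, y) ∈ pvOgrozene mine by
      rw [← PySem.Set.contains_iff]
      cases PySem.Set.contains (pvOgrozene mine) (x, y) <;> simp]
  rw [mem_ogrozene]
  constructor
  · rintro hall ⟨m, hm, hd⟩
    exact hall m hm ((condA_iff_delta x y m).2 hd)
  · intro hne m hm hc
    exact hne ⟨m, hm, (condA_iff_delta x y m).1 hc⟩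

-- ===== VERDICT (by name: the statement is the Claim_ definition above) =====
theorem brez_sosedov_spec : Claim_equal_brez_sosedov := by
  intro mine s v _
  unfold Spec_brez_sosedov brez_sosedov brez_sosedov_alt
  congr 1
  funext vrni x1
  congr 1
  funext vrni y1
  simp only [cond_key mine x1 y1]
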